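-- pv_equiv track=rewrite | github.com/ryoiwata/galvanize_python_self_assessment | ryo_iwata_python_self_assessment/python_code_wars/dubstep.py | song_decoder
-- ===== SOURCE A (Python) =====
-- def song_decoder(song):
--     edited_song = song
--     x = 0
--     for char in edited_song:
--         if edited_song[x : x + 3] == "WUB": #Conditional replaces any segments of WUBs with a space
--             edited_song = " ".join([edited_song[:x], edited_song[x + 3:]])
--         x += 1
--     split_song = edited_song.split() #Allows words to be seperated by only 1 space, no matter the WUBs
--     non_spaced_words = [word for word in split_song if word != ""]
--     result = " ".join(non_spaced_words)
--     return(result)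
-- ===== SOURCE B (Python) =====
-- def song_decoder(song):
--     words = []
--     buf = []
--     i = 0
--     n = len(song)
--     while i < n:
--         if song[i:i+3] == "WUB":
--             if buf:
--                 words.append(''.join(buf))
--                 buf = []
--             i += 3
--         elif song[i].isspace():
--             if buf:
--                 words.append(''.join(buf))
--                 buf = []
--             i += 1
--         else:
--             buf.append(song[i])
--             i += 1
--     if buf:
--         words.append(''.join(buf))
--     return ' '.join(words)
-- ===== Notes on version B (the rewrite author's own statement) =====
-- stated objective: alternative
-- what changed: Replaces A's repeated in-place string surgery (scan for WUB, join-splice the string, keep scanning, then split and re-join) by a single left-to-right tokenizing scan with an index and a word buffer that emits the words directly.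
import Mathlib
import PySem

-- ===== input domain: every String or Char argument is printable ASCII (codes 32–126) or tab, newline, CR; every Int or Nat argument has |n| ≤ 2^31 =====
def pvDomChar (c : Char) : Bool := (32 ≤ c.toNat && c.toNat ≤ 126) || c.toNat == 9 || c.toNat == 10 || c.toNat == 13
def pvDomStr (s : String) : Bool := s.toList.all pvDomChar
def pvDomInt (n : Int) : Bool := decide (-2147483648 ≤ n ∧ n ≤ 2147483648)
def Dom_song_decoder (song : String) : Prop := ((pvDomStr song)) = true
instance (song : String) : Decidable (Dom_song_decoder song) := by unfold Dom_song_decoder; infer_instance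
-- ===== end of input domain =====

-- B replaces A's repeated in-place string splicing followed by split/join with one
-- left-to-right tokenizing scan that emits the words directly (objective: alternative).

-- ===== PORT A =====
-- A's `for char in edited_song` iterates over the string object bound at loop entry
-- (= song), so the body runs exactly song.length times while `edited_song` is reassigned
-- inside; ported as recursion over song.toList carrying the current (edited, x) state.
-- x is a Python int that starts at 0 and only ever gains +1, so it is carried as a Nat
-- and cast to Int exactly where Python slices with it (slices are exact via PySem.List.slice).
def pvALoop : List Char → List Char → Nat → List Char
  | [], e, _ => e
  | _ :: cs, e, x =>
    if PySem.List.slice e (some (x : Int)) (some ((x : Int) + 3)) = ['W', 'U', 'B'] then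
      -- " ".join([edited_song[:x], edited_song[x+3:]])
      pvALoop cs
        (PySem.Chars.join [' ']
          [PySem.List.slice e none (some (x : Int)),
           PySem.List.slice e (some ((x : Int) + 3)) none])
        (x + 1)
    else
      pvALoop cs e (x + 1)

def song_decoder (song : String) : String :=
  let edited := pvALoop song.toList song.toList 0
  let split_song := PySem.Chars.split₀ edited
  let non_spaced_words := split_song.filter (fun w => decide (w ≠ []))
  String.ofList (PySem.Chars.join [' '] non_spaced_words)

-- ===== PORT B =====
-- Source B's while loop over the index i, ported as recursion over the not-yet-scanned
-- suffix song[i:]; buf is the current word buffer, words the completed words in order.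
def pvFlush (words : List (List Char)) (buf : List Char) : List (List Char) :=
  if buf = [] then words else words ++ [buf]

def pvScanB : List Char → List Char → List (List Char) → List (List Char)
  | 'W' :: 'U' :: 'B' :: t, buf, words => pvScanB t [] (pvFlush words buf)
  | c :: t, buf, words =>
    if PySem.Chars.isspace c then pvScanB t [] (pvFlush words buf)
    else pvScanB t (buf ++ [c]) words
  | [], buf, words => pvFlush words buf

def song_decoder_alt (song : String) : String :=
  String.ofList (PySem.Chars.join [' '] (pvScanB song.toList [] []))

-- ===== PRECONDITION & SPEC =====
def Spec_song_decoder (song : String) (out : String) : Prop := out = song_decoder_alt song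
instance (song : String) (out : String) : Decidable (Spec_song_decoder song out) := by unfold Spec_song_decoder; infer_instance

-- ===== CLAIM (what is proved, stated in full; the proofs are below) =====
def Claim_equal_song_decoder : Prop := ∀ (song : String), Dom_song_decoder song → Spec_song_decoder song (song_decoder song)

-- ===== LEMMAS AND PROOFS =====

-- the common normal form: the song with each leftmost "WUB" replaced by one space
def pvWubSub : List Char → List Char
  | [] => []
  | c :: t =>
    if (c :: t).take 3 = ['W', 'U', 'B'] then ' ' :: pvWubSub (t.drop 2)
    else c :: pvWubSub t
termination_by l => l.length
decreasing_by all_goals simp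

lemma pvWubSub_wub (t : List Char) : pvWubSub ('W' :: 'U' :: 'B' :: t) = ' ' :: pvWubSub t := by
  rw [pvWubSub]; simp

lemma pvWubSub_cons_ne (c : Char) (t : List Char) (h : (c :: t).take 3 ≠ ['W', 'U', 'B']) :
    pvWubSub (c :: t) = c :: pvWubSub t := by
  rw [pvWubSub, if_neg h]

lemma take3_iff (c : Char) (t : List Char) :
    (c :: t).take 3 = ['W', 'U', 'B'] ↔ c = 'W' ∧ ∃ t', t = 'U' :: 'B' :: t' := by
  cases t with
  | nil => simp
  | cons a t' =>
    cases t' with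
    | nil => simp
    | cons b t'' => simp

lemma pvJoin_space_pair (a b : List Char) :
    PySem.Chars.join [' '] [a, b] = a ++ ' ' :: b := by
  simp [PySem.Chars.join, List.intercalate]

lemma pvSlice3 (e : List Char) (x : Nat) :
    PySem.List.slice e (some (x : Int)) (some ((x : Int) + 3)) = (e.drop x).take 3 := by
  have := PySem.List.slice_natCast_add (xs := e) (j := x) (n := 3)
  simpa using this

-- once x has passed the end of the current string, the remaining iterations do nothing
lemma pvALoop_past (cs e : List Char) : ∀ x : Nat, e.length ≤ x → pvALoop cs e x = e := by
  induction cs with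
  | nil => intro x h; rfl
  | cons c cs ih =>
    intro x h
    have hdrop : e.drop x = [] := List.drop_eq_nil_of_le h
    have hsl : PySem.List.slice e (some (x : Int)) (some ((x : Int) + 3)) = [] := by
      rw [pvSlice3, hdrop]; rfl
    rw [pvALoop, hsl, if_neg (by simp), ih (x + 1) (by omega)]

-- invariant of A's loop: the scanned prefix p is WUB-free and final, the suffix s untouched
lemma pvALoop_spec (cs : List Char) : ∀ s p : List Char, s.length ≤ cs.length →
    pvALoop cs (p ++ s) p.length = p ++ pvWubSub s := by
  induction cs with
  | nil =>
    intro s p h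
    have : s = [] := List.eq_nil_of_length_eq_zero (by simpa using h)
    subst this
    simp [pvALoop, pvWubSub]
  | cons c cs ih =>
    intro s p h
    have hsl : PySem.List.slice (p ++ s) (some ((p.length : Nat) : Int))
        (some (((p.length : Nat) : Int) + 3)) = s.take 3 := by
      rw [pvSlice3]; simp
    by_cases hw : s.take 3 = ['W', 'U', 'B']
    · obtain ⟨t, rfl⟩ : ∃ t, s = 'W' :: 'U' :: 'B' :: t := by
        refine ⟨s.drop 3, ?_⟩
        conv_lhs => rw [← List.take_append_drop 3 s, hw]
        rfl
      have hto : PySem.List.slice (p ++ 'W' :: 'U' :: 'B' :: t) none (some ((p.length : Nat) : Int))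
          = p := by
        rw [PySem.List.slice_to_natCast]; simp
      have hfrom : PySem.List.slice (p ++ 'W' :: 'U' :: 'B' :: t)
          (some (((p.length : Nat) : Int) + 3)) none = t := by
        have h3 : ((p.length : Nat) : Int) + 3 = (((p.length + 3 : Nat)) : Int) := by push_cast; ring
        rw [h3, PySem.List.slice_from_natCast]
        rw [show p.length + 3 = (p ++ ['W', 'U', 'B']).length by simp]
        rw [show p ++ 'W' :: 'U' :: 'B' :: t = (p ++ ['W', 'U', 'B']) ++ t by simp]
        simp
      have hlen : t.length ≤ cs.length := by
        simp at h; omega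
      rw [pvALoop, hsl, if_pos hw, hto, hfrom, pvJoin_space_pair]
      rw [show p ++ ' ' :: t = (p ++ [' ']) ++ t by simp,
          show p.length + 1 = (p ++ [' ']).length by simp, ih t (p ++ [' ']) hlen]
      rw [pvWubSub_wub]
      simp
    · cases s with
      | nil =>
        rw [List.append_nil, pvALoop, pvSlice3]
        rw [if_neg (by simp [List.drop_eq_nil_of_le (le_refl p.length)])]
        rw [pvALoop_past cs p (p.length + 1) (by omega)]
        rw [pvWubSub]; simp
      | cons d t =>
        have hlen : t.length ≤ cs.length := by simp at h; omega
        rw [pvALoop, hsl, if_neg hw]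
        rw [show p ++ d :: t = (p ++ [d]) ++ t by simp,
            show p.length + 1 = (p ++ [d]).length by simp, ih t (p ++ [d]) hlen]
        rw [pvWubSub_cons_ne d t hw]
        simp

-- B's scanner computes exactly Python's str.split() of the normal form
lemma pvScanB_eq_go (s buf : List Char) (words : List (List Char)) :
    pvScanB s buf words = PySem.Chars.split₀.go (pvWubSub s) buf.reverse words.reverse := by
  induction s, buf, words using pvScanB.induct with
  | case1 t buf words ih =>
    rw [pvScanB, pvWubSub_wub, ih, PySem.Chars.split₀.go]
    have hsp : PySem.Chars.isspace ' ' = true := by decide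
    by_cases hb : buf = []
    · simp [pvFlush, hb, hsp]
    · simp [pvFlush, hb, hsp, List.isEmpty_iff]
  | case2 c t buf words hne hsp ih =>
    have hnw : (c :: t).take 3 ≠ ['W', 'U', 'B'] := by
      intro h; rw [take3_iff] at h; obtain ⟨rfl, t', rfl⟩ := h; exact hne t' rfl rfl
    rw [pvScanB.eq_2 _ _ c t hne, if_pos hsp, ih, pvWubSub_cons_ne c t hnw,
        PySem.Chars.split₀.go, if_pos hsp]
    by_cases hb : buf = []
    · simp [pvFlush, hb]
    · simp [pvFlush, hb, List.isEmpty_iff]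
  | case3 c t buf words hne hsp ih =>
    have hnw : (c :: t).take 3 ≠ ['W', 'U', 'B'] := by
      intro h; rw [take3_iff] at h; obtain ⟨rfl, t', rfl⟩ := h; exact hne t' rfl rfl
    rw [pvScanB.eq_2 _ _ c t hne, if_neg hsp, ih, pvWubSub_cons_ne c t hnw,
        PySem.Chars.split₀.go, if_neg hsp]
    simp
  | case4 buf words =>
    rw [pvScanB, pvWubSub, PySem.Chars.split₀.go]
    by_cases hb : buf = []
    · simp [pvFlush, hb]
    · simp [pvFlush, hb, List.isEmpty_iff]

-- str.split() never yields an empty word, so A's comprehension filter is a no-op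
lemma pvSplit₀_go_ne_nil (l : List Char) : ∀ (cur : List Char) (acc : List (List Char)),
    (∀ w ∈ acc, w ≠ []) → ∀ w ∈ PySem.Chars.split₀.go l cur acc, w ≠ [] := by
  induction l with
  | nil =>
    intro cur acc hacc w hw
    rw [PySem.Chars.split₀.go] at hw
    by_cases hc : cur.isEmpty
    · rw [if_pos hc] at hw; exact hacc w (by simpa using hw)
    · rw [if_neg hc] at hw
      have hcne : cur.reverse ≠ [] := by
        simp only [List.isEmpty_iff] at hc; simpa using hc
      simp at hw
      rcases hw with h | rfl
      · exact hacc w h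
      · exact hcne
  | cons c l ih =>
    intro cur acc hacc w hw
    rw [PySem.Chars.split₀.go] at hw
    by_cases hs : PySem.Chars.isspace c
    · rw [if_pos hs] at hw
      by_cases hc : cur.isEmpty
      · rw [if_pos hc] at hw; exact ih [] acc hacc w hw
      · rw [if_neg hc] at hw
        have hcne : cur.reverse ≠ [] := by
          simp only [List.isEmpty_iff] at hc; simpa using hc
        refine ih [] (cur.reverse :: acc) ?_ w hw
        intro v hv
        rcases List.mem_cons.mp hv with rfl | hv
        · exact hcne
        · exact hacc _ hv
    · rw [if_neg hs] at hw
      exact ih (c :: cur) acc hacc w hw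

-- ===== VERDICT (by name: the statement is the Claim_ definition above) =====
theorem song_decoder_spec : Claim_equal_song_decoder := by
  intro song _
  unfold Spec_song_decoder song_decoder song_decoder_alt
  have hA : pvALoop song.toList song.toList 0 = pvWubSub song.toList := by
    have := pvALoop_spec song.toList song.toList [] (le_refl _)
    simpa using this
  have hB : pvScanB song.toList [] [] = PySem.Chars.split₀ (pvWubSub song.toList) := by
    rw [pvScanB_eq_go]; rfl
  have hfilter :
      (PySem.Chars.split₀ (pvWubSub song.toList)).filter (fun w => decide (w ≠ []))
        = PySem.Chars.split₀ (pvWubSub song.toList) := by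
    refine List.filter_eq_self.mpr ?_
    intro w hw
    have : w ≠ [] :=
      pvSplit₀_go_ne_nil (pvWubSub song.toList) [] [] (by simp) w (by simpa [PySem.Chars.split₀] using hw)
    simpa using this
  simp only [hA, hB, hfilter]
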